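-- pv_equiv track=rewrite | github.com/Bharath-Naveen/containerized-phishing-project | src/pipeline/features/brand_signals.py | _typosquat_embedded_in_label
-- ===== SOURCE A (Python) =====
-- from typing import Any, Dict, List, Sequence, Set
--
-- BRAND_TOKENS: tuple[str, ...] = (
--     "amazon",
--     "apple",
--     "facebook",
--     "google",
--     "instagram",
--     "linkedin",
--     "microsoft",
--     "microsoftonline",
--     "netflix",
--     "paypal",
--     "whatsapp",
--     "icloud",
--     "outlook",
--     "meta",
-- )
--
-- _OFFICIAL_DOMAIN_LABELS: frozenset[str] = frozenset(
--     {
--         "google",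
--         "amazon",
--         "apple",
--         "facebook",
--         "paypal",
--         "netflix",
--         "microsoftonline",
--         "live",
--         "office",
--         "outlook",
--         "icloud",
--         "instagram",
--         "whatsapp",
--         "linkedin",
--         "microsoft",
--         "meta",
--         "fb",
--         "okta",
--         "auth0",
--         "duosecurity",
--         "cloudflare",
--         "github",
--         "gitlab",
--         "stripe",
--         "shopify",
--         "atlassian",
--         "slack",
--         "zoom",
--         "box",
--         "docusign",
--         "dropbox",
--         "salesforce",
--     }
-- )
--
-- def _typosquat_embedded_in_label(labels: Sequence[str]) -> int:
--     """Brand prefix glued to junk (``googleevil``) — skips known official domain labels."""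
--     for lab in labels:
--         if lab in _OFFICIAL_DOMAIN_LABELS:
--             continue
--         for b in BRAND_TOKENS:
--             if lab == b or lab.startswith(b + "-"):
--                 continue
--             if lab.startswith(b) and len(lab) > len(b):
--                 return 1
--     return 0
-- ===== SOURCE B (Python) =====
-- # B: hash-set + distinct-prefix-length lookup instead of the per-token linear scan.
-- BRAND_TOKENS = (
--     "amazon", "apple", "facebook", "google", "instagram", "linkedin",
--     "microsoft", "microsoftonline", "netflix", "paypal", "whatsapp",
--     "icloud", "outlook", "meta",
-- )
--
-- _OFFICIAL_DOMAIN_LABELS = frozenset(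
--     {
--         "google", "amazon", "apple", "facebook", "paypal", "netflix",
--         "microsoftonline", "live", "office", "outlook", "icloud", "instagram",
--         "whatsapp", "linkedin", "microsoft", "meta", "fb", "okta", "auth0",
--         "duosecurity", "cloudflare", "github", "gitlab", "stripe", "shopify",
--         "atlassian", "slack", "zoom", "box", "docusign", "dropbox", "salesforce",
--     }
-- )
--
-- _TOKEN_SET = frozenset(BRAND_TOKENS)
-- _PREFIX_LENS = sorted({len(b) for b in BRAND_TOKENS})
--
--
-- def _typosquat_embedded_in_label(labels) -> int:
--     for lab in labels:
--         if lab in _OFFICIAL_DOMAIN_LABELS: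
--             continue
--         for L in _PREFIX_LENS:
--             if len(lab) > L and lab[:L] in _TOKEN_SET and lab[L] != "-":
--                 return 1
--     return 0
-- ===== Notes on version B (the rewrite author's own statement) =====
-- stated objective: faster
-- what changed: Replaces the per-label linear scan over the 14 brand tokens (with per-token equality/dash-prefix skips) by a lookup table: for each of the 7 distinct token lengths L it checks lab[:L] against a precomputed frozenset and inspects the single character lab[L], so the per-token startswith comparisons and dash/equality skips disappear from the loop.
import Mathlib
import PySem

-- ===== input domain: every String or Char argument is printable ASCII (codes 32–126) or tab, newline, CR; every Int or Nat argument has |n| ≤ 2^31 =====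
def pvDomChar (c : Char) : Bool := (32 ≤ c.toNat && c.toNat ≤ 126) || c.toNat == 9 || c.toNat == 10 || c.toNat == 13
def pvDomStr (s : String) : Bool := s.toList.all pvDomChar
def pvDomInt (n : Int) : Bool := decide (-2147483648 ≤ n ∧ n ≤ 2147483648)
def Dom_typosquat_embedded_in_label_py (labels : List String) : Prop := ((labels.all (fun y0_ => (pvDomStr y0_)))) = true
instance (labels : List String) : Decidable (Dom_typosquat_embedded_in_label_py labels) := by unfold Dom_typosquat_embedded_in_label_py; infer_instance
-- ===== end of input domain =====

-- B replaces A's per-token linear scan (with equality/dash skips) by a prefix-length table and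
-- a set lookup of lab[:L]; objective: alternative (same behaviour, different algorithm).


-- module constants shared by both programs
def brandTokens : List String :=
  ["amazon", "apple", "facebook", "google", "instagram", "linkedin",
   "microsoft", "microsoftonline", "netflix", "paypal", "whatsapp",
   "icloud", "outlook", "meta"]

def officialLabels : List String :=
  ["google", "amazon", "apple", "facebook", "paypal", "netflix",
   "microsoftonline", "live", "office", "outlook", "icloud", "instagram",
   "whatsapp", "linkedin", "microsoft", "meta", "fb", "okta", "auth0",
   "duosecurity", "cloudflare", "github", "gitlab", "stripe", "shopify",
   "atlassian", "slack", "zoom", "box", "docusign", "dropbox", "salesforce"]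

-- ===== PORT A =====
-- inner 'for b in BRAND_TOKENS' loop of A (returns true where A returns 1)
def aHit (lab : String) : List String → Bool
  | [] => false
  | b :: bs =>
    if lab == b || PySem.Str.startswith lab (b ++ "-") then aHit lab bs
    else if PySem.Str.startswith lab b && decide (PySem.Str.len lab > PySem.Str.len b) then true
    else aHit lab bs

def typosquat_embedded_in_label_py (labels : List String) : Int :=
  match labels with
  | [] => 0
  | lab :: rest =>
    if officialLabels.contains lab then typosquat_embedded_in_label_py rest
    else if aHit lab brandTokens then 1
    else typosquat_embedded_in_label_py rest

-- ===== PORT B =====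
-- _TOKEN_SET = frozenset(BRAND_TOKENS); _PREFIX_LENS = sorted({len(b) for b in BRAND_TOKENS})
def tokenSet : List String := brandTokens
def prefixLens : List Int := [4, 5, 6, 7, 8, 9, 15]

-- inner 'for L in _PREFIX_LENS' loop of B; lab[L] != "-" is ported by hand as a
-- comparison of the optional code point with '-' (exact: the branch is length-guarded)
def bHit (lab : String) : List Int → Bool
  | [] => false
  | L :: Ls =>
    if decide (L < PySem.Str.len lab) && tokenSet.contains (PySem.Str.slice lab none (some L))
        && !(PySem.Str.pyGet? lab L == some '-') then true
    else bHit lab Ls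

def typosquat_embedded_in_label_py_alt (labels : List String) : Int :=
  match labels with
  | [] => 0
  | lab :: rest =>
    if officialLabels.contains lab then typosquat_embedded_in_label_py_alt rest
    else if bHit lab prefixLens then 1
    else typosquat_embedded_in_label_py_alt rest

-- ===== PRECONDITION & SPEC =====
def Spec_typosquat_embedded_in_label_py (labels : List String) (out : Int) : Prop := out = typosquat_embedded_in_label_py_alt labels
instance (labels : List String) (out : Int) : Decidable (Spec_typosquat_embedded_in_label_py labels out) := by unfold Spec_typosquat_embedded_in_label_py; infer_instance

-- ===== CLAIM (what is proved, stated in full; the proofs are below) =====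
def Claim_equal_typosquat_embedded_in_label_py : Prop := ∀ (labels : List String), Dom_typosquat_embedded_in_label_py labels → Spec_typosquat_embedded_in_label_py labels (typosquat_embedded_in_label_py labels)

-- ===== LEMMAS AND PROOFS =====

-- the per-token condition both inner loops decide, on the code-point level
def hitCond (cs tb : List Char) : Prop :=
  tb.length < cs.length ∧ cs.take tb.length = tb ∧ cs[tb.length]? ≠ some '-'

lemma aHit_eq_any (lab : String) (bs : List String) :
    aHit lab bs = bs.any (fun b => !(lab == b || PySem.Str.startswith lab (b ++ "-"))
      && (PySem.Str.startswith lab b && decide (PySem.Str.len lab > PySem.Str.len b))) := by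
  induction bs with
  | nil => rfl
  | cons b bs ih =>
    rw [aHit, List.any_cons, ih]
    by_cases h1 : (lab == b || PySem.Str.startswith lab (b ++ "-")) = true
    · rw [if_pos h1, h1, Bool.not_true, Bool.false_and, Bool.false_or]
    · have h1' := eq_false_of_ne_true h1
      rw [if_neg h1, h1', Bool.not_false, Bool.true_and]
      by_cases h2 : (PySem.Str.startswith lab b && decide (PySem.Str.len lab > PySem.Str.len b)) = true
      · rw [if_pos h2, h2, Bool.true_or]
      · rw [if_neg h2, eq_false_of_ne_true h2, Bool.false_or]

lemma bHit_eq_any (lab : String) (Ls : List Int) :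
    bHit lab Ls = Ls.any (fun L => decide (L < PySem.Str.len lab)
      && tokenSet.contains (PySem.Str.slice lab none (some L))
      && !(PySem.Str.pyGet? lab L == some '-')) := by
  induction Ls with
  | nil => rfl
  | cons L Ls ih =>
    rw [bHit, List.any_cons, ih]
    by_cases h1 : (decide (L < PySem.Str.len lab) && tokenSet.contains (PySem.Str.slice lab none (some L))
        && !(PySem.Str.pyGet? lab L == some '-')) = true
    · rw [if_pos h1, h1, Bool.true_or]
    · rw [if_neg h1, eq_false_of_ne_true h1, Bool.false_or]

lemma dash_prefix_iff (cs tb : List Char) (htake : cs.take tb.length = tb) :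
    (tb ++ ['-']) <+: cs ↔ cs[tb.length]? = some '-' := by
  rw [List.prefix_iff_eq_take, List.length_append, List.length_singleton,
      List.take_add_one, htake]
  constructor
  · intro h
    have hc := (List.append_cancel_left h.symm)
    cases hg : cs[tb.length]? with
    | none => simp [hg] at hc
    | some c => simp [hg] at hc; simp [hc]
  · intro h; simp [h]

lemma startswith_true_iff (s p : String) :
    PySem.Str.startswith s p = true ↔ p.toList <+: s.toList := by
  rw [PySem.Str.startswith_eq, PySem.Chars.startswith_iff]

lemma aTerm_iff (lab b : String) :
    (!(lab == b || PySem.Str.startswith lab (b ++ "-"))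
      && (PySem.Str.startswith lab b && decide (PySem.Str.len lab > PySem.Str.len b))) = true
    ↔ hitCond lab.toList b.toList := by
  have hl : (b ++ "-").toList = b.toList ++ ['-'] := by
    simp [String.toList_append]
  simp only [Bool.and_eq_true, Bool.not_eq_true', Bool.or_eq_false_iff, decide_eq_true_eq,
    beq_eq_false_iff_ne, gt_iff_lt, PySem.Str.len_eq, hitCond]
  constructor
  · rintro ⟨⟨hne, hdash⟩, hpre, hlen⟩
    have htake : lab.toList.take b.toList.length = b.toList :=
      (List.prefix_iff_eq_take.mp ((startswith_true_iff lab b).mp hpre)).symm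
    refine ⟨by exact_mod_cast hlen, htake, ?_⟩
    intro hg
    have hcontra : PySem.Str.startswith lab (b ++ "-") = true := by
      rw [startswith_true_iff, hl]
      exact (dash_prefix_iff _ _ htake).mpr hg
    rw [hcontra] at hdash
    exact absurd hdash (by decide)
  · rintro ⟨hlen, htake, hg⟩
    have hpre : b.toList <+: lab.toList := List.prefix_iff_eq_take.mpr htake.symm
    refine ⟨⟨?_, ?_⟩, (startswith_true_iff lab b).mpr hpre, by exact_mod_cast hlen⟩
    · intro h; subst h; exact absurd hlen (lt_irrefl _)
    · rw [Bool.eq_false_iff]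
      intro h
      exact hg ((dash_prefix_iff _ _ htake).mp ((hl ▸ (startswith_true_iff lab (b ++ "-")).mp h)))

lemma bTerm_iff (lab : String) (L : Int) (hL : 0 ≤ L) :
    (decide (L < PySem.Str.len lab) && tokenSet.contains (PySem.Str.slice lab none (some L))
      && !(PySem.Str.pyGet? lab L == some '-')) = true
    ↔ (L.toNat < lab.toList.length ∧ (∃ b ∈ tokenSet, lab.toList.take L.toNat = b.toList)
        ∧ lab.toList[L.toNat]? ≠ some '-') := by
  have hget : PySem.Str.pyGet? lab L = lab.toList[L.toNat]? := by
    simp [PySem.List.pyGet?_of_nonneg _ hL]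
  have hslice : (PySem.Str.slice lab none (some L)).toList = lab.toList.take L.toNat := by
    simp [PySem.List.slice_to _ hL]
  have hmem : tokenSet.contains (PySem.Str.slice lab none (some L)) = true
      ↔ ∃ b ∈ tokenSet, lab.toList.take L.toNat = b.toList := by
    rw [List.contains_iff_exists_mem_beq]
    constructor
    · rintro ⟨b, hb, hbe⟩
      exact ⟨b, hb, by rw [← hslice]; exact congrArg String.toList (eq_of_beq hbe)⟩
    · rintro ⟨b, hb, hbe⟩
      refine ⟨b, hb, beq_iff_eq.mpr ?_⟩
      apply String.toList_inj.mp
      rw [hslice]; exact hbe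
  rw [Bool.and_eq_true, Bool.and_eq_true, hmem, decide_eq_true_eq, PySem.Str.len_eq,
    Bool.not_eq_true', beq_eq_false_iff_ne, hget]
  constructor
  · rintro ⟨⟨h1, h2⟩, h3⟩
    exact ⟨by omega, h2, h3⟩
  · rintro ⟨h1, h2, h3⟩
    exact ⟨⟨by omega, h2⟩, h3⟩

lemma tokenLen_mem : ∀ b ∈ brandTokens, (b.toList.length : Int) ∈ prefixLens := by decide

lemma prefixLens_nonneg : ∀ L ∈ prefixLens, (0 : Int) ≤ L := by decide

lemma hit_main (lab : String) : aHit lab brandTokens = bHit lab prefixLens := by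
  rw [Bool.eq_iff_iff, aHit_eq_any, bHit_eq_any, List.any_eq_true, List.any_eq_true]
  constructor
  · rintro ⟨b, hb, hterm⟩
    obtain ⟨hlen, htake, hg⟩ := (aTerm_iff lab b).mp hterm
    refine ⟨(b.toList.length : Int), tokenLen_mem b hb,
      (bTerm_iff lab _ (by positivity)).mpr ?_⟩
    simp only [Int.toNat_natCast]
    exact ⟨hlen, ⟨b, (by exact hb : b ∈ tokenSet), htake⟩, hg⟩
  · rintro ⟨L, hLmem, hterm⟩
    obtain ⟨hlen, ⟨b, hb, htake⟩, hg⟩ := (bTerm_iff lab L (prefixLens_nonneg L hLmem)).mp hterm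
    have hblen : b.toList.length = L.toNat := by
      have hlt := congrArg List.length htake
      rw [List.length_take] at hlt
      omega
    refine ⟨b, (by exact hb : b ∈ brandTokens), (aTerm_iff lab b).mpr ?_⟩
    exact ⟨by omega, by rw [hblen]; exact htake, by rw [hblen]; exact hg⟩

lemma main_eq (labels : List String) :
    typosquat_embedded_in_label_py labels = typosquat_embedded_in_label_py_alt labels := by
  induction labels with
  | nil => rfl
  | cons lab rest ih =>
    rw [typosquat_embedded_in_label_py, typosquat_embedded_in_label_py_alt, hit_main, ih]

-- ===== VERDICT (by name: the statement is the Claim_ definition above) =====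
theorem typosquat_embedded_in_label_py_spec : Claim_equal_typosquat_embedded_in_label_py := by
  intro labels _
  unfold Spec_typosquat_embedded_in_label_py
  exact main_eq labels
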